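-- pv_equiv track=rewrite | github.com/kmk4162/TIL | CodingTest/프로그래머스/lv1/12947. 하샤드 수/하샤드 수.py | solution
-- ===== SOURCE A (Python) =====
-- def solution(x):
--     jari = 0
--     for i in str(x):
--         jari += int(i)
--     answer = 0
--     if x % jari == 0:
--         answer = True
--     else:
--         answer = False
--     return answer
-- ===== SOURCE B (Python) =====
-- def solution(x):
--     jari = 0
--     y = x
--     while y > 0:
--         jari += y % 10
--         y //= 10
--     return x % jari == 0
-- ===== Notes on version B (the rewrite author's own statement) =====
-- stated objective: alternative
-- what changed: B computes the digit sum with arithmetic (% 10 and // 10 in a while loop) instead of converting x to a string and parsing each character back with int().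
import Mathlib
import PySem

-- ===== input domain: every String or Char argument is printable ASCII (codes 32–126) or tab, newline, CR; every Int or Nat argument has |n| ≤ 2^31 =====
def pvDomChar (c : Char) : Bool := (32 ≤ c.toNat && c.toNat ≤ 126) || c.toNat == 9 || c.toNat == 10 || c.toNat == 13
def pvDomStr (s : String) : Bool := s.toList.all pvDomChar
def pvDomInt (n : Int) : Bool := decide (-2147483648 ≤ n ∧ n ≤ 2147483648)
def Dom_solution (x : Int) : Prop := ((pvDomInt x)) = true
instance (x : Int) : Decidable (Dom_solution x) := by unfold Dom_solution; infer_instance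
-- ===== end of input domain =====

-- B replaces A's string-based digit sum by an arithmetic %10 / //10 loop; same result on all positive x.


-- ===== PORT A =====
-- for i in str(x): jari += int(i)  — int(i) would raise only outside Pre_ (then str(x) starts with '-'),
-- so the `getD 0` default is unreachable under Pre_solution
def solution (x : Int) : Bool :=
  let jari : Int :=
    (PySem.Int.toStr x).toList.foldl (fun acc c => acc + (PySem.Int.ofChars? [c]).getD 0) 0
  -- x % jari == 0 (Python % = fmod); jari = 0 would raise ZeroDivisionError, excluded by Pre_
  decide (PySem.Int.mod x jari = 0)

-- ===== PORT B =====
-- while y > 0: jari += y % 10; y //= 10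
def solutionLoop (y jari : Int) : Int :=
  if 0 < y then
    solutionLoop (PySem.Int.floordiv y 10) (jari + PySem.Int.mod y 10)
  else jari
termination_by y.toNat
decreasing_by
  simp only [PySem.Int.floordiv]
  rw [Int.fdiv_eq_ediv]
  omega

def solution_alt (x : Int) : Bool :=
  decide (PySem.Int.mod x (solutionLoop x 0) = 0)

-- ===== PRECONDITION & SPEC =====
-- Pre_ excludes exactly the inputs where A raises: x = 0 (ZeroDivisionError: digit sum of "0" is 0)
-- and x < 0 (ValueError: int('-') on the sign character).
def Pre_solution (x : Int) : Prop := 0 < x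
instance (x : Int) : Decidable (Pre_solution x) := by unfold Pre_solution; infer_instance
def pvWitness_solution : Int := (18)
def Spec_solution (x : Int) (out : Bool) : Prop := out = solution_alt x
instance (x : Int) (out : Bool) : Decidable (Spec_solution x out) := by unfold Spec_solution; infer_instance

-- ===== CLAIM (what is proved, stated in full; the proofs are below) =====
def Claim_equal_solution : Prop := ∀ (x : Int), Dom_solution x → Pre_solution x → Spec_solution x (solution x)

-- ===== LEMMAS AND PROOFS =====

-- integer digit sum of a list of natural digits (proof-only helper)
def digSum : List Nat → Int
  | [] => 0
  | d :: t => (d : Int) + digSum t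

lemma digSum_append (l1 l2 : List Nat) : digSum (l1 ++ l2) = digSum l1 + digSum l2 := by
  induction l1 with
  | nil => simp [digSum]
  | cons d t ih => simp [digSum, ih]; ring

lemma digSum_reverse (l : List Nat) : digSum l.reverse = digSum l := by
  induction l with
  | nil => rfl
  | cons d t ih => simp [digSum, digSum_append, ih]; ring

-- `int(str(d))` for a single decimal digit
lemma ofChars_digitChar (d : Nat) (hd : d < 10) :
    PySem.Int.ofChars? [Nat.digitChar d] = some (d : Int) := by
  interval_cases d <;> decide

-- A's `Nat.toDigits` is the big-endian digit-character list of `Nat.digits`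
lemma toDigitsCore_eq (fuel : Nat) : ∀ (n : Nat) (acc : List Char), n < fuel → n ≠ 0 →
    Nat.toDigitsCore 10 fuel n acc
      = ((Nat.digits 10 n).reverse.map Nat.digitChar) ++ acc := by
  induction fuel with
  | zero => omega
  | succ f ih =>
    intro n acc hf hn
    rw [Nat.toDigitsCore]
    rw [Nat.digits_def' (by norm_num : 1 < 10) (Nat.pos_of_ne_zero hn)]
    by_cases h10 : n / 10 = 0
    · have hlt : n < 10 := by omega
      have hmod : n % 10 = n := Nat.mod_eq_of_lt hlt
      simp [h10, hmod]
    · rw [if_neg h10, ih (n / 10) _ (by omega) h10]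
      simp

-- A's character fold over digit characters = the digit sum
lemma foldl_digit_sum (l : List Nat) (hl : ∀ d ∈ l, d < 10) : ∀ (a : Int),
    (l.map Nat.digitChar).foldl (fun acc c => acc + (PySem.Int.ofChars? [c]).getD 0) a
      = a + digSum l := by
  induction l with
  | nil => simp [digSum]
  | cons d t ih =>
    intro a
    simp only [List.map_cons, List.foldl_cons, ofChars_digitChar d (hl d (by simp)),
      Option.getD_some, digSum]
    rw [ih (fun e he => hl e (by simp [he]))]
    ring

-- B's loop computes the digit sum of `Nat.digits 10 y.toNat`
lemma solutionLoop_eq (n : Nat) : ∀ (y jari : Int), y.toNat = n →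
    solutionLoop y jari = jari + digSum (Nat.digits 10 y.toNat) := by
  induction n using Nat.strong_induction_on with
  | _ n ih =>
    intro y jari hn
    rw [solutionLoop]
    split_ifs with h
    · have hy : y.toNat ≠ 0 := by omega
      have hfd : PySem.Int.floordiv y 10 = y / 10 := by
        simp only [PySem.Int.floordiv]
        rw [Int.fdiv_eq_ediv]
        norm_num
      have hfm : PySem.Int.mod y 10 = y % 10 := by
        simp only [PySem.Int.mod]
        rw [Int.fmod_eq_emod]
        norm_num
      have hlt : (PySem.Int.floordiv y 10).toNat < n := by rw [hfd]; omega
      rw [ih (PySem.Int.floordiv y 10).toNat hlt _ _ rfl]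
      rw [Nat.digits_def' (by norm_num : 1 < 10) (Nat.pos_of_ne_zero hy)]
      have h2 : (PySem.Int.floordiv y 10).toNat = y.toNat / 10 := by rw [hfd]; omega
      have h1 : PySem.Int.mod y 10 = ((y.toNat % 10 : Nat) : Int) := by rw [hfm]; omega
      rw [h1, h2]
      simp only [digSum]
      ring
    · have hy : y.toNat = 0 := by omega
      simp [hy, digSum]

-- ===== VERDICT (by name: the statement is the Claim_ definition above) =====
theorem solution_spec : Claim_equal_solution := by
  intro x _ hx
  replace hx : 0 < x := hx
  unfold Spec_solution solution solution_alt
  have hx0 : ¬ x < 0 := by omega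
  have hn0 : x.toNat ≠ 0 := by omega
  have hchars : (PySem.Int.toStr x).toList = (Nat.digits 10 x.toNat).reverse.map Nat.digitChar := by
    rw [PySem.Int.toList_toStr]
    simp only [PySem.Int.toChars, if_neg hx0, Nat.toDigits]
    rw [toDigitsCore_eq (x.toNat + 1) x.toNat [] (by omega) hn0]
    simp
  rw [hchars, foldl_digit_sum _ (fun d hd =>
        Nat.digits_lt_base (by norm_num : 1 < 10) (List.mem_reverse.mp hd)) 0]
  rw [solutionLoop_eq x.toNat x 0 rfl, digSum_reverse]
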